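-- pv_equiv track=rewrite | github.com/nskdmitry/TheInternecineStrife | todo/relations_test.py | generateRelations
-- ===== SOURCE A (Python) =====
-- def generateRelations(n):
--     table = []
--     table.append([tuple((i, 0, i, 0)) for i in range(0, n+1)])
--     table[0][0] = tuple((0, 0, 0, -1))
--     no = n - 1
--     for i in range(1, n):
--         table.append([tuple((no + j, i, j, 0)) for j in range(i+1, n+1)])
--         no = no + n - i - 1
--     return table
-- ===== SOURCE B (Python) =====
-- def generateRelations(n):
--     row0 = [(i, 0, i, 0) for i in range(0, n + 1)]
--     row0[0] = (0, 0, 0, -1)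
--     def row(i):
--         b = (n + 1) + (i - 1) * n - (i - 1) * i // 2 - (i + 1)
--         return [(b + j, i, j, 0) for j in range(i + 1, n + 1)]
--     return [row0] + [row(i) for i in range(1, n)]
-- ===== Notes on version B (the rewrite author's own statement) =====
-- stated objective: simpler
-- what changed: Replaces the cross-row running accumulator `no` with a stateless per-row closed form base(i) = (n+1)+(i-1)*n-(i-1)*i//2, so each tuple is computed independently from i and j.
import Mathlib
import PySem

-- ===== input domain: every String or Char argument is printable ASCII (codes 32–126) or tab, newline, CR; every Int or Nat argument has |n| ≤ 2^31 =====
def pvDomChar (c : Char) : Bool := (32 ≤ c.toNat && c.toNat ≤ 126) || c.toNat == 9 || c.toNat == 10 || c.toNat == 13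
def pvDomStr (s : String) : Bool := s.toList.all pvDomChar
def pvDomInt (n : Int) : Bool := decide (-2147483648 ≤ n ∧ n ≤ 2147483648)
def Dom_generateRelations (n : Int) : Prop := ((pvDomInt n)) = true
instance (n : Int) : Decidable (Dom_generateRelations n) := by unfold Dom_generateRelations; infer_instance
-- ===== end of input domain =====

-- B replaces A's running accumulator `no` by a stateless closed-form per-row base
-- formula (objective: simpler); same raising behaviour on n < 0 (outside Pre_).

-- ===== PORT A =====
def generateRelations (n : Int) : List (List (Int × Int × Int × Int)) :=
  -- table.append([...] for i in range(0, n+1)); table[0][0] = (0,0,0,-1)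
  let row0 := (PySem.List.pyRange 0 (n + 1) 1).map (fun i => (i, (0 : Int), i, (0 : Int)))
  -- the assignment raises IndexError when row0 is empty (n < 0); excluded by Pre_
  let row0 := match row0 with
    | [] => []
    | _ :: t => ((0 : Int), (0 : Int), (0 : Int), (-1 : Int)) :: t
  -- no = n - 1; for i in range(1, n): append row; no = no + n - i - 1
  let st := (PySem.List.pyRange 1 n 1).foldl
    (fun (acc : List (List (Int × Int × Int × Int)) × Int) (i : Int) =>
      (acc.1 ++ [(PySem.List.pyRange (i + 1) (n + 1) 1).map (fun j => (acc.2 + j, i, j, (0 : Int)))],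
       acc.2 + n - i - 1))
    ([row0], n - 1)
  st.1

-- ===== PORT B =====
-- base(i) = (n+1) + (i-1)*n - (i-1)*i//2; b = base(i) - (i+1)
def pvRowB (n i : Int) : List (Int × Int × Int × Int) :=
  let b := (n + 1) + (i - 1) * n - PySem.Int.floordiv ((i - 1) * i) 2 - (i + 1)
  (PySem.List.pyRange (i + 1) (n + 1) 1).map (fun j => (b + j, i, j, (0 : Int)))

def generateRelations_alt (n : Int) : List (List (Int × Int × Int × Int)) :=
  -- row0 = [(i,0,i,0) for i in range(0, n+1)]; row0[0] = (0,0,0,-1)  (IndexError if empty)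
  let row0 := (PySem.List.pyRange 0 (n + 1) 1).map (fun i => (i, (0 : Int), i, (0 : Int)))
  let row0 := match row0 with
    | [] => []
    | _ :: t => ((0 : Int), (0 : Int), (0 : Int), (-1 : Int)) :: t
  row0 :: (PySem.List.pyRange 1 n 1).map (fun i => pvRowB n i)

-- ===== PRECONDITION & SPEC =====
-- A (and B) raise IndexError for n < 0 (row 0 is empty, so row0[0] = ... fails)
def Pre_generateRelations (n : Int) : Prop := 0 ≤ n
instance (n : Int) : Decidable (Pre_generateRelations n) := by unfold Pre_generateRelations; infer_instance
def pvWitness_generateRelations : Int := 3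

def Spec_generateRelations (n : Int) (out : List (List (Int × Int × Int × Int))) : Prop := out = generateRelations_alt n
instance (n : Int) (out : List (List (Int × Int × Int × Int))) : Decidable (Spec_generateRelations n out) := by unfold Spec_generateRelations; infer_instance

-- ===== CLAIM (what is proved, stated in full; the proofs are below) =====
def Claim_equal_generateRelations : Prop := ∀ (n : Int), Dom_generateRelations n → Pre_generateRelations n → Spec_generateRelations n (generateRelations n)

-- ===== LEMMAS AND PROOFS =====

-- (i-1)*i is even, so the Python // 2 is exact division
lemma pvFdiv_two (i : Int) : 2 * PySem.Int.floordiv ((i - 1) * i) 2 = (i - 1) * i := by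
  rw [PySem.Int.floordiv_eq_ediv_of_pos (by norm_num)]
  obtain ⟨c, hc⟩ := Int.even_mul_succ_self (i - 1)
  have h2 : (i - 1) * i = c + c := by rw [← hc]; ring
  rw [h2]; omega

lemma pvRow_eq (n a : Int) (no : Int) (hno : 2 * no = 2 * a * (n - 1) - a * (a - 1)) :
    (PySem.List.pyRange (a + 1) (n + 1) 1).map (fun j => (no + j, a, j, (0 : Int)))
      = pvRowB n a := by
  unfold pvRowB
  apply List.map_congr_left
  intro j _
  have hf := pvFdiv_two a
  have : no + j = (n + 1) + (a - 1) * n - PySem.Int.floordiv ((a - 1) * a) 2 - (a + 1) + j := by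
    nlinarith [hno, hf]
  rw [this]

lemma pvLoop_eq (n : Int) : ∀ (k : Nat) (a no : Int)
    (tbl : List (List (Int × Int × Int × Int))),
    (n - a).toNat = k → 2 * no = 2 * a * (n - 1) - a * (a - 1) →
    ((PySem.List.pyRange a n 1).foldl
      (fun (acc : List (List (Int × Int × Int × Int)) × Int) (i : Int) =>
        (acc.1 ++ [(PySem.List.pyRange (i + 1) (n + 1) 1).map (fun j => (acc.2 + j, i, j, (0 : Int)))],
         acc.2 + n - i - 1))
      (tbl, no)).1
      = tbl ++ (PySem.List.pyRange a n 1).map (fun i => pvRowB n i) := by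
  intro k
  induction k with
  | zero =>
    intro a no tbl hk hno
    rw [PySem.List.pyRange_one_eq_nil (by omega)]
    simp
  | succ k ih =>
    intro a no tbl hk hno
    by_cases h : a < n
    · rw [PySem.List.pyRange_one_cons h]
      simp only [List.foldl_cons, List.map_cons]
      rw [ih (a + 1) (no + n - a - 1) _ (by omega) (by nlinarith [hno])]
      rw [pvRow_eq n a no hno]
      simp
    · rw [PySem.List.pyRange_one_eq_nil (by omega)]
      simp

-- ===== VERDICT (by name: the statement is the Claim_ definition above) =====
theorem generateRelations_spec : Claim_equal_generateRelations := by
  intro n _ hpre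
  unfold Spec_generateRelations generateRelations generateRelations_alt
  rw [pvLoop_eq n (n - 1).toNat 1 (n - 1) _ (by omega) (by ring_nf)]
  simp
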